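-- pv_equiv track=rewrite | github.com/Lu-Chengyu/factory-logistics-package-solutions-evaluation | TLP_Solution_V2.1.py | type_count
-- ===== SOURCE A (Python) =====
-- def type_count(list_func=[], original_type_list=[], match_type_list=[]):
--     list_type = []
--     list_type_uni = []
--     list_count = []
--     for i in range(len(list_func)):
--         for j in range(len(match_type_list)):
--             if list_func[i][1] == match_type_list[j]:
--                 list_type.append(original_type_list[j])
--                 if original_type_list[j] not in list_type_uni:
--                     list_type_uni.append(original_type_list[j])
--
--     for i in range(len(list_type_uni)):
--         list_count.append(list_type.count(list_type_uni[i]))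
--
--     return (list_type_uni, list_count)
-- ===== SOURCE B (Python) =====
-- def type_count(list_func=[], original_type_list=[], match_type_list=[]):
--     lookup = {}
--     for m, o in zip(match_type_list, original_type_list):
--         lookup.setdefault(m, []).append(o)
--     vcount = {}
--     for entry in list_func:
--         v = entry[1]
--         vcount[v] = vcount.get(v, 0) + 1
--     counts = {}
--     for v, c in vcount.items():
--         for o in lookup.get(v, []):
--             counts[o] = counts.get(o, 0) + c
--     return (list(counts.keys()), list(counts.values()))
-- ===== Notes on version B (the rewrite author's own statement) =====
-- stated objective: faster
-- what changed: B precomputes a match-value->originals dict and a match-value frequency dict in single passes, then emits each original type's total by weighting, instead of A's nested scan over match_type_list per entry plus a list.count pass per unique type.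
-- outside the precondition, e.g. on type_count([['a9b', '1bba'], ['']], [], []): A returns ([], []), B raises IndexError
import Mathlib
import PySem

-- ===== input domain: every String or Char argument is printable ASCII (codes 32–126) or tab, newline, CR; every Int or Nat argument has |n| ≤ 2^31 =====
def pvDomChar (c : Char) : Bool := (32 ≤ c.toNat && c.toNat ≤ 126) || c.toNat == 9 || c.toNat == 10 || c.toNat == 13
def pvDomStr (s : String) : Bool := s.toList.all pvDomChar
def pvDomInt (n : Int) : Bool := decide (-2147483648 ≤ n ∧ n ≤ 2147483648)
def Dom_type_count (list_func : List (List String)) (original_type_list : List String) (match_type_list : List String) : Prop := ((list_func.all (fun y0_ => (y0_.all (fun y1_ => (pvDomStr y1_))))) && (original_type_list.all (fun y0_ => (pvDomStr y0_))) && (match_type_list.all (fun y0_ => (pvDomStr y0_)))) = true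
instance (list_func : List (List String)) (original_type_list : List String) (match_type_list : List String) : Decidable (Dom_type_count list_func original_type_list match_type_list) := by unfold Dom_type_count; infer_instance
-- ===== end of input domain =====

-- B replaces A's nested scans and per-type list.count passes by a precomputed
-- match-value→originals dict and a group-by count of the entries' match values,
-- preserving first-seen order (measured faster).

-- ===== PORT A =====
def type_count (list_func : List (List String)) (original_type_list : List String) (match_type_list : List String) : List String × List Int :=
  -- state = (list_type, list_type_uni)
  let st := (PySem.List.pyRange 0 (PySem.List.len list_func)).foldl
    (fun st i =>
      (PySem.List.pyRange 0 (PySem.List.len match_type_list)).foldl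
        (fun st j =>
          if PySem.List.pyGetD (PySem.List.pyGetD list_func i []) 1 "" = PySem.List.pyGetD match_type_list j "" then
            let t := PySem.List.pyGetD original_type_list j ""
            (st.1 ++ [t], if t ∈ st.2 then st.2 else st.2 ++ [t])
          else st) st)
    (([] : List String), ([] : List String))
  let list_count := (PySem.List.pyRange 0 (PySem.List.len st.2)).foldl
    (fun acc i => acc ++ [(PySem.List.count st.1 (PySem.List.pyGetD st.2 i "") : Int)]) []
  (st.2, list_count)

-- ===== PORT B =====
def type_count_alt (list_func : List (List String)) (original_type_list : List String) (match_type_list : List String) : List String × List Int :=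
  let lookup : PySem.Dict String (List String) :=
    (match_type_list.zip original_type_list).foldl
      (fun d mo => d.modify mo.1 [] (fun l => l ++ [mo.2])) PySem.Dict.empty
  let vcount : PySem.Dict String Int :=
    list_func.foldl
      (fun d entry =>
        d.insert (PySem.List.pyGetD entry 1 "")
          (d.getD (PySem.List.pyGetD entry 1 "") 0 + 1))
      PySem.Dict.empty
  let counts : PySem.Dict String Int :=
    vcount.items.foldl
      (fun d vc =>
        (lookup.getD vc.1 []).foldl
          (fun d o => d.insert o (d.getD o 0 + vc.2)) d)
      PySem.Dict.empty
  (counts.keys, counts.values)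

-- ===== PRECONDITION & SPEC =====
-- Pre_ excludes the inputs where A or B raises IndexError: an entry of
-- list_func with fewer than 2 fields (list_func[i][1]), or an entry whose match
-- value occurs in match_type_list at an index ≥ len(original_type_list)
-- (original_type_list[j]); when match_type_list is empty A skips the entry access
-- and returns a pair of empty lists even for a short entry, but B's single pass indexes
-- entry[1] unconditionally and raises there, so those inputs are excluded too.
def Pre_type_count (list_func : List (List String)) (original_type_list : List String) (match_type_list : List String) : Prop :=
  (∀ f ∈ list_func, 2 ≤ f.length) ∧
  (∀ f ∈ list_func, ∀ t ∈ match_type_list.drop original_type_list.length,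
    PySem.List.pyGetD f 1 "" ≠ t)
instance (list_func : List (List String)) (original_type_list : List String) (match_type_list : List String) : Decidable (Pre_type_count list_func original_type_list match_type_list) := by unfold Pre_type_count; infer_instance

def pvWitness_type_count : List (List String) × List String × List String :=
  ([["f", "a"], ["g", "b"], ["h", "a"]], (["T1", "T2"], ["a", "b"]))

def Spec_type_count (list_func : List (List String)) (original_type_list : List String) (match_type_list : List String) (out : List String × List Int) : Prop := out = type_count_alt list_func original_type_list match_type_list
instance (list_func : List (List String)) (original_type_list : List String) (match_type_list : List String) (out : List String × List Int) : Decidable (Spec_type_count list_func original_type_list match_type_list out) := by unfold Spec_type_count; infer_instance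

-- ===== CLAIM (what is proved, stated in full; the proofs are below) =====
def Claim_equal_type_count : Prop := ∀ (list_func : List (List String)) (original_type_list : List String) (match_type_list : List String), Dom_type_count list_func original_type_list match_type_list → Pre_type_count list_func original_type_list match_type_list → Spec_type_count list_func original_type_list match_type_list (type_count list_func original_type_list match_type_list)


-- ===== LEMMAS AND PROOFS =====

-- the originals matched by value v, in index order (what A's inner loop appends)
def pvMatched (match_type_list original_type_list : List String) (v : String) : List String :=
  ((match_type_list.zip original_type_list).filter (fun p => v == p.1)).map Prod.snd

-- the whole stream of appended originals, over all of list_func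
def pvStream (list_func : List (List String)) (original_type_list : List String) (match_type_list : List String) : List String :=
  list_func.flatMap (fun f => pvMatched match_type_list original_type_list (PySem.List.pyGetD f 1 ""))

-- a fold over range(len(xs)) that touches its index only through xs[i] is a fold over xs
lemma pv_fold_idx {α σ : Type} (xs : List α) (d : α) (g : σ → α → σ) (init : σ) :
    (PySem.List.pyRange 0 (PySem.List.len xs)).foldl (fun st i => g st (PySem.List.pyGetD xs i d)) init
      = xs.foldl g init := by
  have h := List.foldl_map (f := fun i => PySem.List.pyGetD xs i d) (g := g)
    (l := PySem.List.pyRange 0 (PySem.List.len xs)) (init := init)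
  rw [PySem.List.map_pyGetD_pyRange_zero] at h
  rw [← h]

-- A's inner loop over j appends exactly pvMatched, provided no out-of-range index is matched
lemma pv_inner {σ : Type} (step : σ → String → σ) (v : String) :
    ∀ (ml ol : List String) (st : σ),
      (∀ t ∈ ml.drop ol.length, v ≠ t) →
      (List.range ml.length).foldl
        (fun st j => if v = ml.getD j "" then step st (ol.getD j "") else st) st
      = (pvMatched ml ol v).foldl step st := by
  intro ml
  induction ml with
  | nil => intro ol st _; simp [pvMatched]
  | cons m ml ih =>
    intro ol st h
    simp only [List.length_cons]
    rw [List.range_succ_eq_map, List.foldl_cons, List.foldl_map]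
    have hbody : (fun (st : σ) (j : ℕ) =>
          if v = (m :: ml).getD (Nat.succ j) "" then step st (ol.getD (Nat.succ j) "") else st)
        = (fun (st : σ) (j : ℕ) => if v = ml.getD j "" then step st (ol.tail.getD j "") else st) := by
      funext st j
      cases ol <;> rfl
    rw [hbody]
    cases ol with
    | nil =>
      have hm : v ≠ m := h m (by simp)
      have h' : ∀ t ∈ ml.drop ([] : List String).length, v ≠ t := by
        intro t ht; exact h t (by simp at ht ⊢; right; exact ht)
      rw [show (m :: ml).getD 0 "" = m from rfl, if_neg hm]
      rw [show ([] : List String).tail = ([] : List String) from rfl, ih [] st h']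
      simp [pvMatched]
    | cons o ol =>
      have h' : ∀ t ∈ ml.drop ol.length, v ≠ t := by
        intro t ht; exact h t (by simpa using ht)
      rw [show (o :: ol).tail = ol from rfl]
      rw [show (m :: ml).getD 0 "" = m from rfl, show (o :: ol).getD 0 "" = o from rfl]
      by_cases hv : v = m
      · rw [if_pos hv, ih ol (step st o) h']
        have : (v == m) = true := by simp [hv]
        simp [pvMatched, this]
      · rw [if_neg hv, ih ol st h']
        have : (v == m) = false := by simp [hv]
        simp [pvMatched, this]

-- same statement, phrased on A's pyRange/pyGetD loop
lemma pv_inner_py {σ : Type} (step : σ → String → σ) (v : String) (ml ol : List String) (st : σ)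
    (h : ∀ t ∈ ml.drop ol.length, v ≠ t) :
    (PySem.List.pyRange 0 (PySem.List.len ml)).foldl
      (fun st j => if v = PySem.List.pyGetD ml j "" then step st (PySem.List.pyGetD ol j "") else st) st
    = (pvMatched ml ol v).foldl step st := by
  have hlen : PySem.List.len ml = ((ml.length : Nat) : Int) := by simp [PySem.List.len]
  rw [hlen, PySem.List.pyRange_zero_natCast, List.foldl_map]
  simp only [PySem.List.pyGetD_natCast]
  exact pv_inner step v ml ol st h

-- the (list_type, list_type_uni) fold over a stream, in closed form
lemma pv_state : ∀ (S : List String) (lt uni : List String),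
    S.foldl (fun (st : List String × List String) t =>
        (st.1 ++ [t], if t ∈ st.2 then st.2 else st.2 ++ [t])) (lt, uni)
    = (lt ++ S, S.foldl PySem.Set.add uni) := by
  intro S
  induction S with
  | nil => intro lt uni; simp
  | cons t S ih =>
    intro lt uni
    rw [List.foldl_cons, List.foldl_cons, ih]
    rw [PySem.Set.add_eq_ite]
    simp

-- folding a per-entry list fold over list_func is a single fold over the flattened stream
lemma pv_flat {σ : Type} (step : σ → String → σ) (g : List String → List String) :
    ∀ (L : List (List String)) (st : σ),
      L.foldl (fun st f => (g f).foldl step st) st = (L.flatMap g).foldl step st := by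
  intro L
  induction L with
  | nil => intro st; simp
  | cons f L ih => intro st; simp [List.foldl_cons, ih, List.foldl_append]

-- A in closed form
lemma pv_A (list_func : List (List String)) (original_type_list match_type_list : List String)
    (h2 : ∀ f ∈ list_func, ∀ t ∈ match_type_list.drop original_type_list.length,
        PySem.List.pyGetD f 1 "" ≠ t) :
    type_count list_func original_type_list match_type_list
    = (PySem.Set.ofList (pvStream list_func original_type_list match_type_list),
       (PySem.Set.ofList (pvStream list_func original_type_list match_type_list)).map
         (fun t => (List.count t (pvStream list_func original_type_list match_type_list) : Int))) := by
  unfold type_count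
  dsimp only
  set S := pvStream list_func original_type_list match_type_list with hS
  -- outer loop: a fold over list_func
  rw [pv_fold_idx list_func ([] : List String)
      (fun (st : List String × List String) f =>
        (PySem.List.pyRange 0 (PySem.List.len match_type_list)).foldl
          (fun st j =>
            if PySem.List.pyGetD f 1 "" = PySem.List.pyGetD match_type_list j "" then
              (st.1 ++ [PySem.List.pyGetD original_type_list j ""],
               if PySem.List.pyGetD original_type_list j "" ∈ st.2 then st.2
               else st.2 ++ [PySem.List.pyGetD original_type_list j ""])
            else st) st) ([], [])]
  -- inner loops: folds over pvMatched
  have hinner : list_func.foldl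
      (fun (st : List String × List String) f =>
        (PySem.List.pyRange 0 (PySem.List.len match_type_list)).foldl
          (fun st j =>
            if PySem.List.pyGetD f 1 "" = PySem.List.pyGetD match_type_list j "" then
              (st.1 ++ [PySem.List.pyGetD original_type_list j ""],
               if PySem.List.pyGetD original_type_list j "" ∈ st.2 then st.2
               else st.2 ++ [PySem.List.pyGetD original_type_list j ""])
            else st) st) ([], [])
      = (S, S.foldl PySem.Set.add []) := by
    have hcongr : ∀ (st : List String × List String), ∀ f ∈ list_func,
        (PySem.List.pyRange 0 (PySem.List.len match_type_list)).foldl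
          (fun st j =>
            if PySem.List.pyGetD f 1 "" = PySem.List.pyGetD match_type_list j "" then
              (st.1 ++ [PySem.List.pyGetD original_type_list j ""],
               if PySem.List.pyGetD original_type_list j "" ∈ st.2 then st.2
               else st.2 ++ [PySem.List.pyGetD original_type_list j ""])
            else st) st
        = (pvMatched match_type_list original_type_list (PySem.List.pyGetD f 1 "")).foldl
            (fun (st : List String × List String) t =>
              (st.1 ++ [t], if t ∈ st.2 then st.2 else st.2 ++ [t])) st := by
      intro st f hf
      exact pv_inner_py (fun st t => (st.1 ++ [t], if t ∈ st.2 then st.2 else st.2 ++ [t]))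
        (PySem.List.pyGetD f 1 "") match_type_list original_type_list st (h2 f hf)
    rw [PySem.List.foldl_congr_mem list_func _ _ _ hcongr]
    rw [pv_flat]
    rw [pv_state]
    simp [hS, pvStream]
  rw [hinner]
  -- the count loop: a map over the unique list
  rw [pv_fold_idx (S.foldl PySem.Set.add []) ""
      (fun acc t => acc ++ [(PySem.List.count S t : Int)]) []]
  rw [PySem.List.foldl_append_singleton_eq_map (fun t => (PySem.List.count S t : Int))]
  rw [← PySem.Set.ofList_eq_foldl]
  simp [PySem.List.count]

-- B's lookup dict maps v to pvMatched v (library getD_foldl_modify_append, beq flipped)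
lemma pv_matched_eq (ml ol : List String) (v : String) :
    pvMatched ml ol v
    = ((ml.zip ol).filter (fun p => p.1 == v)).map Prod.snd := by
  unfold pvMatched
  congr 1
  apply List.filter_congr
  intro p _
  simp [eq_comm]

-- the weighted inner fold of B's last loop, pointwise
lemma pv_getD_weight (c : Int) :
    ∀ (l : List String) (d : PySem.Dict String Int) (t : String),
      (l.foldl (fun d o => d.insert o (d.getD o 0 + c)) d).getD t 0
      = d.getD t 0 + c * (List.count t l : Int) := by
  intro l
  induction l with
  | nil => intro d t; simp
  | cons o l ih =>
    intro d t
    rw [List.foldl_cons, ih]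
    by_cases ht : t = o
    · subst ht
      rw [PySem.Dict.getD_insert_self]
      have : List.count t (t :: l) = List.count t l + 1 := by simp
      rw [this]
      push_cast
      ring
    · have hne := PySem.Dict.getD_insert_of_ne d (d.getD o 0 + c) 0 (show t ≠ o from ht)
      rw [hne]
      have : List.count t (o :: l) = List.count t l := by
        simp [Ne.symm ht]
      rw [this]

-- B's whole last loop, pointwise: a weighted sum over the value list
lemma pv_getD_big (g : String → List String) (c : String → Int) :
    ∀ (W : List String) (d : PySem.Dict String Int) (t : String),
      (W.foldl (fun d v => (g v).foldl (fun d o => d.insert o (d.getD o 0 + c v)) d) d).getD t 0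
      = d.getD t 0 + (W.map (fun v => c v * (List.count t (g v) : Int))).sum := by
  intro W
  induction W with
  | nil => intro d t; simp
  | cons v W ih =>
    intro d t
    rw [List.foldl_cons, ih, pv_getD_weight]
    simp [add_assoc]

-- B's whole last loop, key list: the union of the g-blocks in order
lemma pv_keys_big (g : String → List String) (c : String → Int) :
    ∀ (W : List String) (d : PySem.Dict String Int),
      (W.foldl (fun d v => (g v).foldl (fun d o => d.insert o (d.getD o 0 + c v)) d) d).keys
      = PySem.Set.update d.keys (W.flatMap g) := by
  intro W
  induction W with
  | nil => intro d; simp [PySem.Set.update_nil]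
  | cons v W ih =>
    intro d
    rw [List.foldl_cons, ih]
    rw [PySem.Dict.keys_foldl_insert (g v) (fun d x => d.getD x 0 + c v) d]
    rw [List.flatMap_cons, PySem.Set.update_append]

-- adding elements already present changes nothing
lemma pv_update_of_mem (s : PySem.Set String) (l : List String)
    (h : ∀ x ∈ l, x ∈ s) :
    s.update l = s := by
  rw [PySem.Set.update_eq_append_filter]
  have : (PySem.Set.ofList l).filter (fun y => !s.contains y) = [] := by
    rw [List.filter_eq_nil_iff]
    intro y hy
    simpa using h y ((PySem.Set.mem_ofList l y).mp hy)
  rw [this]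
  exact List.append_nil s

-- deduplicating the value list first does not change the set of produced elements
lemma pv_ofList_flatMap_dedup (g : String → List String) :
    ∀ (V : List String),
      PySem.Set.ofList ((PySem.Set.ofList V).flatMap g) = PySem.Set.ofList (V.flatMap g) := by
  intro V
  induction V using List.reverseRecOn with
  | nil => rfl
  | append_singleton V v ih =>
    rw [PySem.Set.ofList_append_singleton]
    by_cases hv : v ∈ V
    · rw [PySem.Set.add_of_mem ((PySem.Set.mem_ofList V v).mpr hv), ih]
      rw [List.flatMap_append, PySem.Set.ofList_append]
      rw [pv_update_of_mem]
      · intro x hx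
        rw [List.flatMap_singleton] at hx
        exact (PySem.Set.mem_ofList _ x).mpr (List.mem_flatMap.mpr ⟨v, hv, hx⟩)
    · rw [PySem.Set.add_eq_ite,
          if_neg (fun hc => hv ((PySem.Set.mem_ofList V v).mp hc))]
      rw [List.flatMap_append, List.flatMap_append, PySem.Set.ofList_append,
          PySem.Set.ofList_append, ih]
-- a 0-almost-everywhere sum over a duplicate-free list picks its one nonzero term
lemma pv_sum_ite (z : String → Int) (v : String) :
    ∀ (W : List String), W.Nodup → v ∈ W →
      (W.map (fun w => if w = v then z w else 0)).sum = z v := by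
  intro W
  induction W with
  | nil => intro _ h; cases h
  | cons w W ih =>
    intro hnd hmem
    rcases List.mem_cons.mp hmem with h | h
    · have hzero : ∀ x ∈ W, (if x = v then z x else 0) = 0 := by
        intro x hx
        have hxv : x ≠ v := fun he => (List.nodup_cons.mp hnd).1 (h ▸ he ▸ hx)
        simp [hxv]
      simp only [List.map_cons, List.sum_cons]
      rw [if_pos h.symm, List.map_congr_left hzero]
      simp [← h]
    · have hwv : w ≠ v := fun he => (List.nodup_cons.mp hnd).1 (he ▸ h)
      simp only [List.map_cons, List.sum_cons, if_neg hwv]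
      rw [ih (List.nodup_cons.mp hnd).2 h]
      simp

-- the grouped weighted sum equals the plain sum over the value list
lemma pv_group_sum (h : String → Nat) :
    ∀ (V : List String),
      ((PySem.Set.ofList V).map (fun v => ((List.count v V : Nat) : Int) * (h v : Int))).sum
      = ((V.map h).sum : Int) := by
  intro V
  induction V using List.reverseRecOn with
  | nil => rfl
  | append_singleton V v ih =>
    rw [PySem.Set.ofList_append_singleton]
    have hcnt : ∀ w, List.count w (V ++ [v]) = List.count w V + (if w = v then 1 else 0) := by
      intro w
      rw [List.count_append]
      by_cases hw : w = v
      · simp [hw]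
      · have hvw : ¬ v = w := fun he => hw he.symm
        simp [hw, hvw]
    by_cases hv : v ∈ V
    · rw [PySem.Set.add_of_mem ((PySem.Set.mem_ofList V v).mpr hv)]
      have hsplit : ((PySem.Set.ofList V).map
            (fun w => ((List.count w (V ++ [v]) : Nat) : Int) * (h w : Int))).sum
          = ((PySem.Set.ofList V).map
              (fun w => ((List.count w V : Nat) : Int) * (h w : Int))).sum
            + ((PySem.Set.ofList V).map
              (fun w => if w = v then (h w : Int) else 0)).sum := by
        rw [← PySem.List.sum_map_add_int]
        apply congrArg
        apply List.map_congr_left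
        intro w _
        rw [hcnt w]
        by_cases hw : w = v
        · simp [hw]
          ring
        · simp [hw]
      rw [hsplit, ih,
          pv_sum_ite (fun w => (h w : Int)) v (PySem.Set.ofList V)
            (PySem.Set.nodup_ofList V) ((PySem.Set.mem_ofList V v).mpr hv)]
      simp
    · rw [PySem.Set.add_eq_ite,
          if_neg (fun hc => hv ((PySem.Set.mem_ofList V v).mp hc))]
      have hfix : ((PySem.Set.ofList V).map
            (fun w => ((List.count w (V ++ [v]) : Nat) : Int) * (h w : Int)))
          = ((PySem.Set.ofList V).map
            (fun w => ((List.count w V : Nat) : Int) * (h w : Int))) := by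
        apply List.map_congr_left
        intro w hw
        have hwv : w ≠ v := fun he => hv (he ▸ (PySem.Set.mem_ofList V w).mp hw)
        rw [hcnt w, if_neg hwv]
        simp
      rw [List.map_append, List.sum_append, hfix, ih]
      simp only [List.map_cons, List.map_nil, List.sum_cons, List.sum_nil]
      rw [hcnt v, List.count_eq_zero_of_not_mem hv]
      simp

-- B in closed form
lemma pv_B (list_func : List (List String)) (original_type_list match_type_list : List String) :
    type_count_alt list_func original_type_list match_type_list
    = (PySem.Set.ofList (pvStream list_func original_type_list match_type_list),
       (PySem.Set.ofList (pvStream list_func original_type_list match_type_list)).map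
         (fun t => (List.count t (pvStream list_func original_type_list match_type_list) : Int))) := by
  unfold type_count_alt
  dsimp only
  set g := fun v => pvMatched match_type_list original_type_list v with hg
  set V := list_func.map (fun f => PySem.List.pyGetD f 1 "") with hV
  have hS : pvStream list_func original_type_list match_type_list = V.flatMap g := by
    rw [hV, List.flatMap_map]
    rfl
  -- the lookup dict maps v to pvMatched v
  have hlook : ∀ v, ((match_type_list.zip original_type_list).foldl
      (fun d (mo : String × String) => d.modify mo.1 [] (fun l => l ++ [mo.2]))
      PySem.Dict.empty).getD v [] = g v := by
    intro v
    show _ = pvMatched match_type_list original_type_list v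
    rw [PySem.Dict.getD_foldl_modify_append, pv_matched_eq]
    simp [PySem.Dict.getD, PySem.Dict.get?, PySem.Dict.empty]
  simp only [hlook]
  -- the value-count dict is a counter of the value stream V
  have hvc : list_func.foldl
      (fun d f =>
        d.insert (PySem.List.pyGetD f 1 "") (d.getD (PySem.List.pyGetD f 1 "") 0 + 1))
      PySem.Dict.empty = PySem.Dict.counter V := by
    rw [hV, ← List.foldl_map (f := fun f => PySem.List.pyGetD f 1 "")
        (g := fun (d : PySem.Dict String Int) v => d.insert v (d.getD v 0 + 1))]
    exact PySem.Dict.foldl_insert_getD_add_one_eq_counter _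
  rw [hvc, PySem.Dict.items_counter V, List.foldl_map]
  -- the final dict: fold over the distinct values with their multiplicities
  set W := PySem.Set.ofList V with hW
  set D := W.foldl
      (fun (d : PySem.Dict String Int) v =>
        (g v).foldl (fun d o => d.insert o (d.getD o 0 + (List.count v V : Int))) d)
      PySem.Dict.empty with hD
  have hkeys : D.keys = PySem.Set.ofList (V.flatMap g) := by
    rw [hD, pv_keys_big g (fun v => (List.count v V : Int)) W PySem.Dict.empty]
    rw [show (PySem.Dict.empty : PySem.Dict String Int).keys = ([] : List String) from rfl]
    rw [show PySem.Set.update ([] : List String) (W.flatMap g)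
          = PySem.Set.ofList (W.flatMap g) from
        (PySem.Set.update_nil_left (W.flatMap g))]
    exact pv_ofList_flatMap_dedup g V
  have hgetD : ∀ t, D.getD t 0 = (List.count t (V.flatMap g) : Int) := by
    intro t
    rw [hD, pv_getD_big g (fun v => (List.count v V : Int)) W PySem.Dict.empty t]
    rw [show (PySem.Dict.empty : PySem.Dict String Int).getD t 0 = 0 from rfl, zero_add]
    rw [List.count_flatMap]
    exact pv_group_sum (fun v => List.count t (g v)) V
  have hnodup : D.keys.Nodup := by
    rw [hkeys]; exact PySem.Set.nodup_ofList _
  have hvals : D.values = D.keys.map (fun t => (List.count t (V.flatMap g) : Int)) := by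
    rw [PySem.Dict.values_eq_map_keys D hnodup 0]
    exact List.map_congr_left (fun t _ => hgetD t)
  rw [hvals, hkeys, hS]

-- ===== VERDICT (by name: the statement is the Claim_ definition above) =====
theorem type_count_spec : Claim_equal_type_count := by
  intro list_func original_type_list match_type_list _ hPre
  unfold Spec_type_count
  rw [pv_A list_func original_type_list match_type_list hPre.2,
      pv_B list_func original_type_list match_type_list]
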